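-- pv_equiv track=rewrite | github.com/jgdelrio/tutorials | HackerRank/array_pairs.py | solve
-- ===== SOURCE A (Python) =====
-- def solve(arr):
--     counter = 0
--     m = max(arr)
--     idx = arr.index(m)
--     left = arr[:idx]
--     right = arr[idx+1:]
--     if len(left) > 1:
--         counter += solve(left)
--     if len(right) > 1:
--         counter += solve(right)
--
--     counter += left.count(1)
--     counter += right.count(1)
--
--     left.sort()
--     right.sort()
--     if len(right) > 0:
--         for l in left:
--             if l * right[0] <= m:
--                 counter += 1
--             else:
--                 break
--
--             for r in right[1:]:
--                 if l * r <= m: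
--                     counter += 1
--                 else:
--                     break
--     return counter
-- ===== SOURCE B (Python) =====
-- def _ubound(xs, q, lo):
--     # first index >= lo with xs[idx] > q, in ascending-sorted xs (hand-rolled bisect_right)
--     hi = len(xs)
--     while lo < hi:
--         mid = (lo + hi) // 2
--         if q < xs[mid]:
--             hi = mid
--         else:
--             lo = mid + 1
--     return lo
--
--
-- def solve(arr):
--     total = 0
--     stack = [arr]
--     while stack:
--         seg = stack.pop()
--         m = max(seg)
--         i = seg.index(m)
--         left = seg[:i]
--         right = seg[i + 1:]
--         if len(left) > 1:
--             stack.append(left)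
--         if len(right) > 1:
--             stack.append(right)
--         total += left.count(1) + right.count(1)
--         sl = sorted(left)
--         sr = sorted(right)
--         if sr:
--             r0 = sr[0]
--             n = len(sr)
--             for l in sl:
--                 if l * r0 > m:
--                     break
--                 if l <= 0:
--                     total += n
--                 else:
--                     total += _ubound(sr, m // l, 1)
--     return total
-- ===== Notes on version B (the rewrite author's own statement) =====
-- stated objective: alternative
-- what changed: Replaces A's recursion with an explicit stack and replaces A's inner break-scan over the sorted right part with a closed form per left element: the whole tail when l <= 0, a hand-rolled binary search for the first product exceeding the maximum when l > 0.
-- outside the precondition, e.g. on solve([]): A raises ValueError, B raises ValueError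
import Mathlib
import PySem

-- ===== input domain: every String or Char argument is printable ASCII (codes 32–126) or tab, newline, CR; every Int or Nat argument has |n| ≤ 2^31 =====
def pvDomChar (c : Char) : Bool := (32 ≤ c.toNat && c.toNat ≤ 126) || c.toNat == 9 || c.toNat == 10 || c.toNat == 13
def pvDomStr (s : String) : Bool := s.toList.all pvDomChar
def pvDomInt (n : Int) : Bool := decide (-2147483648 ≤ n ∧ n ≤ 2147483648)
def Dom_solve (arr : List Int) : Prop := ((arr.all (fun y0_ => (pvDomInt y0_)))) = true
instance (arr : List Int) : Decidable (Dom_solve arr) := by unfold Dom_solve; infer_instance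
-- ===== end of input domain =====

-- B replaces A's recursion by an explicit stack and A's inner break-scan over the sorted
-- right part by a closed form (whole tail for l ≤ 0, hand-rolled binary search for l > 0);
-- objective: alternative (a genuinely different traversal and cross-count of the same cost).

-- needed by both ports' termination proofs (cited in decreasing_by)
theorem pvIdx_lt_length {arr : List Int} {m : Int}
    (h : PySem.List.max? arr (fun x => x) = some m) :
    (PySem.List.index? arr m).getD 0 < arr.length := by
  have hm : m ∈ arr := PySem.List.max?_mem h
  have hs : ∃ k, PySem.List.index? arr m = some k := by
    have := (PySem.List.index?_isSome_iff (xs := arr) (v := m)).2 hm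
    exact Option.isSome_iff_exists.1 this
  obtain ⟨k, hk⟩ := hs
  obtain ⟨hlt, -, -⟩ := PySem.List.getElem_of_index?_eq_some hk
  rw [hk]
  exact hlt

-- slice-length facts cited by both ports' decreasing_by
theorem pvLenTake (arr : List Int) (i : Nat) :
    (PySem.List.slice arr none (some (i : Int))).length = min i arr.length := by
  rw [PySem.List.slice_to_natCast]
  exact List.length_take ..

theorem pvLenDrop1 (arr : List Int) (i : Nat) :
    (PySem.List.slice arr (some ((i : Int) + 1)) none).length = arr.length - (i + 1) := by
  rw [PySem.List.slice_from arr (a := (i : Int) + 1) (by omega)]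
  have : ((i : Int) + 1).toNat = i + 1 := by omega
  rw [this]
  exact List.length_drop ..

-- ===== PORT A =====
-- inner 'for r in right[1:]: if l*r <= m: counter += 1 else: break'
def innerA (m l : Int) : List Int → Int
  | [] => 0
  | r :: rs => if l * r ≤ m then 1 + innerA m l rs else 0

-- outer 'for l in left: if l*right[0] <= m: counter += 1 else: break; <inner loop>'
def outerA (m r0 : Int) (rrest : List Int) : List Int → Int
  | [] => 0
  | l :: ls => if l * r0 ≤ m then 1 + innerA m l rrest + outerA m r0 rrest ls else 0

def solve (arr : List Int) : Int :=
  match h : PySem.List.max? arr (fun x => x) with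
  | none => 0          -- Python: max([]) raises ValueError; excluded by Pre_solve
  | some m =>
    let idx := (PySem.List.index? arr m).getD 0
    let left := PySem.List.slice arr none (some (idx : Int))
    let right := PySem.List.slice arr (some ((idx : Int) + 1)) none
    let c0 : Int := (if 1 < left.length then solve left else 0) +
                    (if 1 < right.length then solve right else 0)
    let c1 : Int := c0 + (PySem.List.count left 1 : Int) + (PySem.List.count right 1 : Int)
    -- left.sort(); right.sort(); if len(right) > 0: <cross loops>
    match PySem.List.sorted right (fun x => x) with
    | [] => c1
    | r0 :: rs => c1 + outerA m r0 rs (PySem.List.sorted left (fun x => x))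
termination_by arr.length
decreasing_by
  · have hlt := pvIdx_lt_length h
    simp only [left, idx, pvLenTake]
    omega
  · have hlt := pvIdx_lt_length h
    simp only [right, idx, pvLenDrop1]
    omega

-- ===== PORT B =====
-- hand-rolled bisect_right loop of Source B: 'while lo < hi: mid = (lo+hi)//2; …'
def uboundLoop (xs : List Int) (q : Int) (lo hi : Nat) : Nat :=
  if lo < hi then
    -- mid = (lo + hi) // 2; xs[mid] is in range whenever reached
    if q < xs.getD ((lo + hi) / 2) 0 then uboundLoop xs q lo ((lo + hi) / 2)
    else uboundLoop xs q ((lo + hi) / 2 + 1) hi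
  else lo
termination_by hi - lo
decreasing_by all_goals omega

def ubound (xs : List Int) (q : Int) (lo : Nat) : Nat := uboundLoop xs q lo xs.length

-- Source B's 'for l in sl: if l*r0 > m: break; …' body
def crossB (m r0 : Int) (sr : List Int) : List Int → Int
  | [] => 0
  | l :: ls =>
    if l * r0 > m then 0
    else (if l ≤ 0 then (sr.length : Int)
          else (ubound sr (PySem.Int.floordiv m l) 1 : Int)) + crossB m r0 sr ls

-- Source B's 'while stack:' loop; head of the list = top of the stack
def solveLoop (stack : List (List Int)) (total : Int) : Int :=
  match stack with
  | [] => total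
  | seg :: rest =>
    match h : PySem.List.max? seg (fun x => x) with
    | none => solveLoop rest total   -- Python: max([]) raises; only reachable from the excluded empty input
    | some m =>
      let i := (PySem.List.index? seg m).getD 0
      let left := PySem.List.slice seg none (some (i : Int))
      let right := PySem.List.slice seg (some ((i : Int) + 1) ) none
      let st1 := if 1 < left.length then left :: rest else rest
      let st2 := if 1 < right.length then right :: st1 else st1
      let t1 := total + (PySem.List.count left 1 : Int) + (PySem.List.count right 1 : Int)
      match PySem.List.sorted right (fun x => x) with
      | [] => solveLoop st2 t1
      | r0 :: rs => solveLoop st2 (t1 + crossB m r0 (r0 :: rs) (PySem.List.sorted left (fun x => x)))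
termination_by ((stack.map List.length).sum, stack.length)
decreasing_by
  · have hseg : seg = [] := (PySem.List.max?_eq_none_iff _ _).1 h
    subst hseg
    simp only [List.map_cons, List.sum_cons, List.length_nil, Nat.zero_add]
    exact Prod.Lex.right _ (by simp)
  all_goals
  · have hlt := pvIdx_lt_length h
    apply Prod.Lex.left
    simp only [st2, st1, left, right, i, pvLenTake, pvLenDrop1]
    split_ifs <;>
      simp only [List.map_cons, List.sum_cons, pvLenTake, pvLenDrop1] <;> omega

def solve_alt (arr : List Int) : Int := solveLoop [arr] 0

-- ===== PRECONDITION & SPEC =====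
-- Python A raises ValueError (max of empty sequence) on []; excluded.
def Pre_solve (arr : List Int) : Prop := arr ≠ []
instance (arr : List Int) : Decidable (Pre_solve arr) := by unfold Pre_solve; infer_instance
def pvWitness_solve : List Int := [2, 1, 3]
def Spec_solve (arr : List Int) (out : Int) : Prop := out = solve_alt arr
instance (arr : List Int) (out : Int) : Decidable (Spec_solve arr out) := by unfold Spec_solve; infer_instance

-- ===== CLAIM (what is proved, stated in full; the proofs are below) =====
def Claim_equal_solve : Prop := ∀ (arr : List Int), Dom_solve arr → Pre_solve arr → Spec_solve arr (solve arr)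

-- ===== LEMMAS AND PROOFS =====

theorem solve_nil : solve [] = 0 := by
  rw [solve]
  split
  · rfl
  · rename_i m hm
    rw [(PySem.List.max?_eq_none_iff ([] : List Int) (fun x : Int => x)).2 rfl] at hm
    cases hm

theorem innerA_eq {m l : Int} : ∀ (rs : List Int) (k : Nat), k ≤ rs.length →
    (∀ i (h : i < rs.length), i < k → l * rs[i] ≤ m) →
    (∀ (h : k < rs.length), m < l * rs[k]) →
    innerA m l rs = (k : Int) := by
  intro rs
  induction rs with
  | nil =>
    intro k hk _ _
    have : k = 0 := by simpa using hk
    subst this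
    simp [innerA]
  | cons r t ih =>
    intro k hk h1 h2
    cases k with
    | zero =>
      have := h2 (by simp)
      simp only [List.getElem_cons_zero] at this
      simp [innerA, not_le.2 this]
    | succ k =>
      have hr : l * r ≤ m := by
        have := h1 0 (by simp) (by omega)
        simpa using this
      have : innerA m l t = (k : Int) := by
        apply ih k (by simpa using hk)
        · intro i hi hik
          have := h1 (i + 1) (by simpa using Nat.succ_lt_succ hi) (by omega)
          simpa using this
        · intro hlt
          have := h2 (by simpa using Nat.succ_lt_succ hlt)
          simpa using this
      simp [innerA, hr, this]
      ring

theorem uboundLoop_char (xs : List Int) (q : Int) (hs : xs.Pairwise (· ≤ ·)) :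
    ∀ lo hi, lo ≤ hi → hi ≤ xs.length →
    (∀ i (h : i < xs.length), i < lo → xs[i] ≤ q) →
    (∀ i (h : i < xs.length), hi ≤ i → q < xs[i]) →
    lo ≤ uboundLoop xs q lo hi ∧ uboundLoop xs q lo hi ≤ hi ∧
    (∀ i (h : i < xs.length), i < uboundLoop xs q lo hi → xs[i] ≤ q) ∧
    (∀ i (h : i < xs.length), uboundLoop xs q lo hi ≤ i → q < xs[i]) := by
  have hmono : ∀ i j (hi : i < xs.length) (hj : j < xs.length), i ≤ j → xs[i] ≤ xs[j] := by
    intro i j hi hj hij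
    rcases Nat.eq_or_lt_of_le hij with rfl | hlt
    · exact le_refl _
    · exact (List.pairwise_iff_getElem.1 hs) i j hi hj hlt
  intro lo hi
  induction hn : hi - lo using Nat.strong_induction_on generalizing lo hi with
  | _ n ih =>
    intro hlohi hhile h1 h2
    rw [uboundLoop]
    by_cases hlt : lo < hi
    · simp only [hlt, if_true]
      have hmid1 : lo ≤ (lo + hi) / 2 := by omega
      have hmid2 : (lo + hi) / 2 < hi := by omega
      have hmlen : (lo + hi) / 2 < xs.length := by omega
      have hget : xs.getD ((lo + hi) / 2) 0 = xs[(lo + hi) / 2] := List.getD_eq_getElem _ _ hmlen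
      by_cases hq : q < xs.getD ((lo + hi) / 2) 0
      · simp only [hq, if_true]
        obtain ⟨a, b, c, d⟩ := ih ((lo + hi) / 2 - lo) (by omega) lo ((lo + hi) / 2)
          (by omega) (by omega) (by omega) h1
          (by intro i hil hmi
              calc q < xs[(lo + hi) / 2] := hget ▸ hq
                _ ≤ xs[i] := hmono _ _ hmlen hil hmi)
        exact ⟨a, by omega, c, d⟩
      · simp only [hq, if_false]
        obtain ⟨a, b, c, d⟩ := ih (hi - ((lo + hi) / 2 + 1)) (by omega) ((lo + hi) / 2 + 1) hi
          (by omega) (by omega) hhile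
          (by intro i hil hi1
              calc xs[i] ≤ xs[(lo + hi) / 2] := hmono _ _ hil hmlen (by omega)
                _ ≤ q := by rw [← hget]; exact not_lt.1 hq) h2
        exact ⟨by omega, b, c, d⟩
    · simp only [hlt, if_false]
      have : lo = hi := by omega
      refine ⟨le_refl _, by omega, fun i h hilo => h1 i h hilo, fun i h hloi => h2 i h (by omega)⟩

theorem crossB_eq_outerA (m r0 : Int) (rs : List Int)
    (hs : (r0 :: rs).Pairwise (· ≤ ·)) :
    ∀ sl, crossB m r0 (r0 :: rs) sl = outerA m r0 rs sl := by
  have hhead : ∀ r ∈ rs, r0 ≤ r := (List.pairwise_cons.1 hs).1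
  intro sl
  induction sl with
  | nil => rfl
  | cons l ls ih =>
    rw [crossB, outerA]
    by_cases hbr : l * r0 > m
    · simp [hbr, not_le.2 hbr]
    · have hle : l * r0 ≤ m := not_lt.1 hbr
      simp only [hbr, if_false, hle, if_true, ih]
      congr 1
      by_cases hl : l ≤ 0
      · -- whole tail counts: l ≤ 0 and l*r0 ≤ m imply l*r ≤ m for every r ≥ r0
        have : innerA m l rs = (rs.length : Int) := by
          apply innerA_eq rs rs.length (le_refl _) _ (by omega)
          intro i hi _
          calc l * rs[i] ≤ l * r0 := mul_le_mul_of_nonpos_left (hhead _ (by simp)) hl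
            _ ≤ m := hle
        simp [hl, this]
        ring
      · -- l > 0: binary search for the first index with xs[idx] > m // l
        have hl0 : 0 < l := by omega
        have hq : PySem.Int.floordiv m l = m / l := PySem.Int.floordiv_eq_ediv_of_pos hl0
        have hiff : ∀ r : Int, l * r ≤ m ↔ r ≤ m / l := by
          intro r
          rw [Int.le_ediv_iff_mul_le hl0, mul_comm]
        obtain ⟨hk1, hk2, hk3, hk4⟩ := uboundLoop_char (r0 :: rs) (m / l) hs 1 (r0 :: rs).length
          (by simp) (le_refl _)
          (by intro i hi hi1
              have : i = 0 := by omega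
              subst this
              simpa using (hiff r0).1 hle)
          (by intro i hi hile; omega)
        generalize hgen : uboundLoop (r0 :: rs) (m / l) 1 (r0 :: rs).length = k
          at hk1 hk2 hk3 hk4
        obtain ⟨j, rfl⟩ : ∃ j, k = j + 1 := ⟨k - 1, by omega⟩
        have hinner : innerA m l rs = (j : Int) := by
          apply innerA_eq rs j (by simp at hk2; omega)
          · intro i hi hij
            have := hk3 (i + 1) (by simp; omega) (by omega)
            have h2 : rs[i] ≤ m / l := by simpa using this
            exact (hiff _).2 h2
          · intro hlt2
            have := hk4 (j + 1) (by simp; omega) (le_refl _)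
            simp only [List.getElem_cons_succ] at this
            by_contra hcon
            exact absurd ((hiff _).1 (not_lt.1 hcon)) (not_le.2 this)
        simp only [hl, if_false, ubound, hq, hgen, hinner]
        push_cast
        ring

theorem solve_of_some {arr : List Int} {m : Int}
    (h : PySem.List.max? arr (fun x => x) = some m) :
    solve arr =
      (let idx := (PySem.List.index? arr m).getD 0
       let left := PySem.List.slice arr none (some (idx : Int))
       let right := PySem.List.slice arr (some ((idx : Int) + 1)) none
       let c0 : Int := (if 1 < left.length then solve left else 0) +
                       (if 1 < right.length then solve right else 0)
       let c1 : Int := c0 + (PySem.List.count left 1 : Int) + (PySem.List.count right 1 : Int)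
       match PySem.List.sorted right (fun x => x) with
       | [] => c1
       | r0 :: rs => c1 + outerA m r0 rs (PySem.List.sorted left (fun x => x))) := by
  rw [solve]
  split
  · rename_i hnone
    rw [h] at hnone
    cases hnone
  · rename_i m' hsome
    rw [h] at hsome
    injection hsome with hmm
    subst hmm
    rfl

theorem solveLoop_eq : ∀ (stack : List (List Int)) (total : Int),
    solveLoop stack total = total + (stack.map solve).sum := by
  intro stack total
  fun_induction solveLoop stack total with
  | case1 => simp
  | case2 total seg rest h ih =>
    have : seg = [] := (PySem.List.max?_eq_none_iff _ _).1 h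
    subst this
    simp [ih, solve_nil]
  | case3 total seg rest m h i left right st1 st2 t1 hsr ih =>
    simp only [List.map_cons, List.sum_cons]
    rw [ih, solve_of_some h]
    simp only [i, left, right, st1, st2, t1] at hsr ⊢
    rw [hsr]
    split_ifs <;> simp <;> ring
  | case4 total seg rest m h i left right st1 st2 t1 r0 rs hsr ih =>
    simp only [List.map_cons, List.sum_cons]
    rw [ih, solve_of_some h]
    rw [crossB_eq_outerA m r0 rs (by
      have := PySem.List.sorted_pairwise right (fun x => x)
      rw [hsr] at this
      simpa using this)]
    simp only [i, left, right, st1, st2, t1] at hsr ⊢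
    rw [hsr]
    split_ifs <;> simp <;> ring

-- ===== VERDICT (by name: the statement is the Claim_ definition above) =====
theorem solve_spec : Claim_equal_solve := by
  intro arr _ _
  unfold Spec_solve solve_alt
  rw [solveLoop_eq]
  simp
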